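-- pv_equiv track=rewrite | github.com/elliotjm/f1_race_strategy_planner | race strategy.py | tyre_set_usage_okay
-- ===== SOURCE A (Python) =====
-- TYRE_SET_LIMITS = {
--     'Soft': 2,
--     'Medium': 2,
--     'Hard': 2,
--     'Inter': 3,
--     'Wet': 3
-- }
--
-- def tyre_set_usage_okay(strategy):
--     usage = {}
--     for tyre, _ in strategy:
--         usage[tyre] = usage.get(tyre, 0) + 1
--     for tyre, count in usage.items():
--         if count > TYRE_SET_LIMITS.get(tyre, 0):
--             return False
--     return True
-- ===== SOURCE B (Python) =====
-- TYRE_SET_LIMITS = {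
--     'Soft': 2,
--     'Medium': 2,
--     'Hard': 2,
--     'Inter': 3,
--     'Wet': 3
-- }
--
-- def tyre_set_usage_okay(strategy):
--     usage = {}
--     for tyre, _ in strategy:
--         n = usage.get(tyre, 0) + 1
--         if n > TYRE_SET_LIMITS.get(tyre, 0):
--             return False
--         usage[tyre] = n
--     return True
-- ===== Notes on version B (the rewrite author's own statement) =====
-- stated objective: simpler
-- what changed: Fuses A's two passes (build a full usage counter, then scan its items) into a single pass that checks each incremented count against its limit immediately and returns False at once.
import Mathlib
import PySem

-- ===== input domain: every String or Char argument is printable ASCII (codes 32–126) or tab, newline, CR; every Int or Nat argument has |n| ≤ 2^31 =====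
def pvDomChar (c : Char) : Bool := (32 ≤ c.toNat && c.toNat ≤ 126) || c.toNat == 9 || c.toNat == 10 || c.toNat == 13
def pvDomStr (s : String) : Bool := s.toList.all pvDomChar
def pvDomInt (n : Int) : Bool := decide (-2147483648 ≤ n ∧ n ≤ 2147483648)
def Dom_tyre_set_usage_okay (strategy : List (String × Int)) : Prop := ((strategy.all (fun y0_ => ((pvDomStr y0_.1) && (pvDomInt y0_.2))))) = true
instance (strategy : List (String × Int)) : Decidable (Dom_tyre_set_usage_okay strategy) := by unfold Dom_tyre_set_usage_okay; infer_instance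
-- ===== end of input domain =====

-- B fuses A's two passes (count all, then check the counts) into one pass that
-- checks each incremented count immediately and exits early (objective: simpler).

-- ===== PORT A =====
def TYRE_SET_LIMITS : PySem.Dict String Int :=
  PySem.Dict.ofList [("Soft", 2), ("Medium", 2), ("Hard", 2), ("Inter", 3), ("Wet", 3)]

-- A's second loop with its early `return False`
def pvCheckItems : List (String × Int) → Bool
  | [] => true
  | (tyre, count) :: rest =>
      if count > TYRE_SET_LIMITS.getD tyre 0 then false else pvCheckItems rest

def tyre_set_usage_okay (strategy : List (String × Int)) : Bool :=
  let usage := strategy.foldl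
    (fun usage p => usage.insert p.1 (usage.getD p.1 0 + 1)) PySem.Dict.empty
  pvCheckItems usage.items

-- ===== PORT B =====
def pvGoB (usage : PySem.Dict String Int) : List (String × Int) → Bool
  | [] => true
  | (tyre, _) :: rest =>
      let n := usage.getD tyre 0 + 1
      if n > TYRE_SET_LIMITS.getD tyre 0 then false
      else pvGoB (usage.insert tyre n) rest

def tyre_set_usage_okay_alt (strategy : List (String × Int)) : Bool :=
  pvGoB PySem.Dict.empty strategy

-- ===== PRECONDITION & SPEC =====
def Spec_tyre_set_usage_okay (strategy : List (String × Int)) (out : Bool) : Prop := out = tyre_set_usage_okay_alt strategy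
instance (strategy : List (String × Int)) (out : Bool) : Decidable (Spec_tyre_set_usage_okay strategy out) := by unfold Spec_tyre_set_usage_okay; infer_instance

-- ===== CLAIM (what is proved, stated in full; the proofs are below) =====
def Claim_equal_tyre_set_usage_okay : Prop := ∀ (strategy : List (String × Int)), Dom_tyre_set_usage_okay strategy → Spec_tyre_set_usage_okay strategy (tyre_set_usage_okay strategy)

-- ===== LEMMAS AND PROOFS =====

theorem pvLimits_nonneg (t : String) : 0 ≤ TYRE_SET_LIMITS.getD t 0 := by
  have h : TYRE_SET_LIMITS =
      PySem.Dict.mk [("Soft", 2), ("Medium", 2), ("Hard", 2), ("Inter", 3), ("Wet", 3)] := by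
    decide
  rw [h]
  simp [PySem.Dict.getD, PySem.Dict.get?_mk_cons]
  split_ifs <;> norm_num [PySem.Dict.get?]

theorem pvCheckItems_eq_all (l : List (String × Int)) :
    pvCheckItems l = l.all (fun p => decide (p.2 ≤ TYRE_SET_LIMITS.getD p.1 0)) := by
  induction l with
  | nil => rfl
  | cons p rest ih =>
      obtain ⟨t, c⟩ := p
      simp only [pvCheckItems, ih, List.all_cons]
      split_ifs with h <;> simp <;> omega

theorem pvGoB_iff (rest : List (String × Int)) (usage : PySem.Dict String Int)
    (h : ∀ t, usage.getD t 0 ≤ TYRE_SET_LIMITS.getD t 0) :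
    pvGoB usage rest = true ↔
      ∀ t, usage.getD t 0 + ((rest.map Prod.fst).count t : Int) ≤ TYRE_SET_LIMITS.getD t 0 := by
  induction rest generalizing usage with
  | nil => simpa [pvGoB] using h
  | cons p rest ih =>
      obtain ⟨t, v⟩ := p
      by_cases hgt : usage.getD t 0 + 1 > TYRE_SET_LIMITS.getD t 0
      · simp only [pvGoB, if_pos hgt]
        constructor
        · intro hF; exact absurd hF (by simp)
        · intro hall
          have := hall t
          simp [List.map_cons] at this
          omega
      · simp only [pvGoB, if_neg hgt]
        push Not at hgt
        rw [ih (usage.insert t (usage.getD t 0 + 1))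
          (by
            intro s
            by_cases hs : s = t
            · subst hs; rw [PySem.Dict.getD_insert_self]; exact hgt
            · rw [PySem.Dict.getD_insert_of_ne _ _ _ hs]; exact h s)]
        constructor
        · intro hall s
          have := hall s
          by_cases hs : s = t
          · subst hs
            rw [PySem.Dict.getD_insert_self] at this
            simp [List.map_cons]
            omega
          · rw [PySem.Dict.getD_insert_of_ne _ _ _ hs] at this
            simpa [List.map_cons, Ne.symm hs] using this
        · intro hall s
          have := hall s
          by_cases hs : s = t
          · subst hs
            rw [PySem.Dict.getD_insert_self]
            simp [List.map_cons] at this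
            omega
          · rw [PySem.Dict.getD_insert_of_ne _ _ _ hs]
            simpa [List.map_cons, Ne.symm hs] using this

theorem pvA_iff (strategy : List (String × Int)) :
    tyre_set_usage_okay strategy = true ↔
      ∀ t, ((strategy.map Prod.fst).count t : Int) ≤ TYRE_SET_LIMITS.getD t 0 := by
  unfold tyre_set_usage_okay
  have hfold : strategy.foldl
      (fun usage p => usage.insert p.1 (usage.getD p.1 0 + 1)) PySem.Dict.empty
      = PySem.Dict.counter (strategy.map Prod.fst) := by
    rw [← PySem.Dict.foldl_insert_getD_add_one_eq_counter, List.foldl_map]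
  rw [hfold, pvCheckItems_eq_all, PySem.Dict.items_counter, List.all_map, List.all_eq_true]
  constructor
  · intro hall t
    by_cases ht : t ∈ strategy.map Prod.fst
    · have := hall t (by simpa [PySem.Set.mem_ofList] using ht)
      simpa using this
    · rw [List.count_eq_zero_of_not_mem ht]
      simpa using pvLimits_nonneg t
  · intro hall t ht
    simpa using hall t

theorem pvB_iff (strategy : List (String × Int)) :
    tyre_set_usage_okay_alt strategy = true ↔
      ∀ t, ((strategy.map Prod.fst).count t : Int) ≤ TYRE_SET_LIMITS.getD t 0 := by
  unfold tyre_set_usage_okay_alt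
  rw [pvGoB_iff strategy PySem.Dict.empty
    (by intro t; simpa [PySem.Dict.getD, PySem.Dict.get?, PySem.Dict.empty] using pvLimits_nonneg t)]
  constructor <;> intro hall t <;> have := hall t <;>
    simpa [PySem.Dict.getD, PySem.Dict.get?, PySem.Dict.empty] using this

-- ===== VERDICT (by name: the statement is the Claim_ definition above) =====
theorem tyre_set_usage_okay_spec : Claim_equal_tyre_set_usage_okay := by
  intro strategy _
  unfold Spec_tyre_set_usage_okay
  rw [Bool.eq_iff_iff, pvA_iff, pvB_iff]
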